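-- pv_equiv track=rewrite | github.com/thierryxdp/TCC | problems/835/solution_352991.py | melhor_volta
-- ===== SOURCE A (Python) =====
-- def melhor_volta(matriz):
--     """A função retorna uma tuppla contendo o dono da melhor volta, qual o tempo e em que rodada.
--     list-->tuple"""
--     tempos = []
--     for list in matriz:
--         tempos.append(min(list))
--     menor = min(tempos)
--     melhor = tempos.index(menor)
--     todos = matriz[melhor]
--     volta = todos.index(menor)
--
--     return  melhor + 1, menor, volta +1
-- ===== SOURCE B (Python) =====
-- def melhor_volta(matriz):
--     """Retorna (rodada, tempo, volta) da melhor volta: uma única varredura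
--     que mantém o melhor (tempo, linha, coluna) visto até agora.
--     list-->tuple"""
--     best = None
--     for i, linha in enumerate(matriz):
--         for j, tempo in enumerate(linha):
--             if best is None or tempo < best[0]:
--                 best = (tempo, i, j)
--     menor, rodada, volta = best
--     return rodada + 1, menor, volta + 1
-- ===== Notes on version B (the rewrite author's own statement) =====
-- stated objective: simpler
-- what changed: Replaces the row-minima list plus min()/.index()/.index() lookups with one row-major scan that tracks the best (value, row, col) triple directly; strict '<' preserves first-occurrence tie-breaking. Pre_ excludes only inputs where A raises (empty matrix or an empty row, on which min() raises ValueError).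
import Mathlib
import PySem

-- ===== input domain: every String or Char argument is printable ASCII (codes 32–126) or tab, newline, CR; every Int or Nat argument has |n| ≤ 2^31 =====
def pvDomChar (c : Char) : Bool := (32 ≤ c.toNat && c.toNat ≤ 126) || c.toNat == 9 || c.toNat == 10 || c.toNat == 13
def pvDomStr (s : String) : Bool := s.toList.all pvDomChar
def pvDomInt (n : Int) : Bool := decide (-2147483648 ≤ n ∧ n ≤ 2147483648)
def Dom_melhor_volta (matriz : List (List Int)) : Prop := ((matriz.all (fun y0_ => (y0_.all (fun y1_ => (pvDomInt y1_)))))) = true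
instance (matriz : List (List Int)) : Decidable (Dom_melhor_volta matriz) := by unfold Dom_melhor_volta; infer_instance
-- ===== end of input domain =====

-- B replaces A's row-minima list plus min()/.index()/.index() passes by one
-- row-major scan tracking the best (value, row, col); return-value equivalence on Pre_.

-- ===== PORT A =====
def melhor_volta (matriz : List (List Int)) : Int × Int × Int :=
  let tempos := matriz.foldl (fun acc l => acc ++ [(PySem.List.min? l (fun x => x)).getD 0]) []
  let menor := (PySem.List.min? tempos (fun x => x)).getD 0
  let melhor := (PySem.List.index? tempos menor).getD 0
  let todos := (PySem.List.pyGet? matriz (melhor : Int)).getD []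
  let volta := (PySem.List.index? todos menor).getD 0
  ((melhor : Int) + 1, menor, (volta : Int) + 1)

-- ===== PORT B =====
-- the inner-loop body of Source B: update best on a strictly smaller time
def pvStep (i : Int) (acc : Option (Int × Int × Int)) (q : Int × Int) : Option (Int × Int × Int) :=
  match acc with
  | none => some (q.2, i, q.1)
  | some b => if q.2 < b.1 then some (q.2, i, q.1) else acc

-- the outer-loop body of Source B: scan one enumerated row
def pvRow (acc : Option (Int × Int × Int)) (p : Int × List Int) : Option (Int × Int × Int) :=
  (PySem.List.enumerate p.2 0).foldl (pvStep p.1) acc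

def melhor_volta_alt (matriz : List (List Int)) : Int × Int × Int :=
  match (PySem.List.enumerate matriz 0).foldl pvRow none with
  | some (menor, rodada, volta) => (rodada + 1, menor, volta + 1)
  | none => (0, 0, 0)   -- unreachable under Pre_: Python unpacks None here and raises

-- ===== PRECONDITION & SPEC =====
-- Pre_ excludes exactly the inputs where A raises: min() raises ValueError on an empty matrix or on any empty row.
def Pre_melhor_volta (matriz : List (List Int)) : Prop := matriz ≠ [] ∧ ∀ l ∈ matriz, l ≠ []
instance (matriz : List (List Int)) : Decidable (Pre_melhor_volta matriz) := by unfold Pre_melhor_volta; infer_instance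
def pvWitness_melhor_volta : List (List Int) := [[3, 1], [2, 4]]

def Spec_melhor_volta (matriz : List (List Int)) (out : Int × Int × Int) : Prop := out = melhor_volta_alt matriz
instance (matriz : List (List Int)) (out : Int × Int × Int) : Decidable (Spec_melhor_volta matriz out) := by unfold Spec_melhor_volta; infer_instance

-- ===== CLAIM (what is proved, stated in full; the proofs are below) =====
def Claim_equal_melhor_volta : Prop := ∀ (matriz : List (List Int)), Dom_melhor_volta matriz → Pre_melhor_volta matriz → Spec_melhor_volta matriz (melhor_volta matriz)

-- ===== LEMMAS AND PROOFS =====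

def rowminD (l : List Int) : Int := (PySem.List.min? l (fun x => x)).getD 0
def idxD (l : List Int) : Nat := (PySem.List.index? l (rowminD l)).getD 0

theorem rowminD_cons (x : Int) (t : List Int) (h : t ≠ []) :
    rowminD (x :: t) = min x (rowminD t) := by
  cases t with
  | nil => exact absurd rfl h
  | cons y t' =>
    simp only [rowminD, PySem.List.min?_id_cons, Option.getD_some, List.foldl_cons]
    exact List.foldl_assoc

theorem rowminD_mem (l : List Int) (h : l ≠ []) : rowminD l ∈ l := by
  cases l with
  | nil => exact absurd rfl h
  | cons x t =>
    have := PySem.List.min?_mem (PySem.List.min?_id_cons x t)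
    simpa [rowminD, PySem.List.min?_id_cons] using this

theorem idxD_cons_self (x : Int) (t : List Int) (h : rowminD (x :: t) = x) :
    idxD (x :: t) = 0 := by
  unfold idxD
  rw [h, PySem.List.index?_cons_self]
  rfl

theorem index?_rowminD (t : List Int) (h : t ≠ []) :
    PySem.List.index? t (rowminD t) = some (idxD t) := by
  have := (PySem.List.index?_isSome_iff t (rowminD t)).mpr (rowminD_mem t h)
  cases hi : PySem.List.index? t (rowminD t) with
  | none => rw [hi] at this; simp at this
  | some k => unfold idxD; rw [hi]; rfl

theorem idxD_cons_gt (x : Int) (t : List Int) (h : t ≠ []) (hlt : rowminD t < x) :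
    rowminD (x :: t) = rowminD t ∧ idxD (x :: t) = idxD t + 1 := by
  have hr : rowminD (x :: t) = rowminD t := by rw [rowminD_cons x t h]; omega
  refine ⟨hr, ?_⟩
  have hne : x ≠ rowminD t := by omega
  unfold idxD
  rw [hr, PySem.List.index?_cons_of_ne t hne, index?_rowminD t h]
  rfl

-- inner loop from a some-accumulator
theorem inner_some (i : Int) : ∀ (l : List Int) (s : Int) (b : Int × Int × Int),
    (PySem.List.enumerate l s).foldl (pvStep i) (some b) =
      if l = [] then some b
      else if rowminD l < b.1 then some (rowminD l, i, s + (idxD l : Int)) else some b := by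
  intro l
  induction l with
  | nil => simp [PySem.List.enumerate_nil]
  | cons x t ih =>
    intro s b
    rw [PySem.List.enumerate_cons, List.foldl_cons]
    have hstep : pvStep i (some b) (s, x) = if x < b.1 then some (x, i, s) else some b := rfl
    rw [hstep]
    by_cases hx : x < b.1
    · rw [if_pos hx, ih]
      cases ht : t with
      | nil =>
        have h1 : rowminD [x] = x := rfl
        have h2 : idxD [x] = 0 := idxD_cons_self x [] h1
        simp [h1, h2, hx]
      | cons y t' =>
        rw [← ht]
        have htne : t ≠ [] := by simp [ht]
        simp only [if_neg htne, if_neg (by simp : ¬ (x :: t = []))]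
        by_cases h2 : rowminD t < x
        · obtain ⟨hr, hi⟩ := idxD_cons_gt x t htne h2
          rw [if_pos h2, hr, if_pos (by omega), hi]
          push_cast; ring_nf
        · have hr : rowminD (x :: t) = x := by rw [rowminD_cons x t htne]; omega
          rw [if_neg h2, hr, if_pos hx, idxD_cons_self x t hr]
          simp
    · rw [if_neg hx, ih]
      cases ht : t with
      | nil =>
        have h1 : rowminD [x] = x := rfl
        simp [h1, hx]
      | cons y t' =>
        rw [← ht]
        have htne : t ≠ [] := by simp [ht]
        simp only [if_neg htne, if_neg (by simp : ¬ (x :: t = []))]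
        by_cases h2 : rowminD t < b.1
        · have h3 : rowminD t < x := by omega
          obtain ⟨hr, hi⟩ := idxD_cons_gt x t htne h3
          rw [if_pos h2, hr, if_pos h2, hi]
          push_cast; ring_nf
        · rw [if_neg h2]
          have hr : ¬ (rowminD (x :: t) < b.1) := by rw [rowminD_cons x t htne]; omega
          rw [if_neg hr]

def temposD (m : List (List Int)) : List Int := m.map rowminD
def menorD (m : List (List Int)) : Int := rowminD (temposD m)
def melhorD (m : List (List Int)) : Nat := idxD (temposD m)
def voltaD (m : List (List Int)) : Nat :=
  (PySem.List.index? ((m[melhorD m]?).getD []) (menorD m)).getD 0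

theorem pvRow_some (s : Int) (l : List Int) (hl : l ≠ []) (b : Int × Int × Int) :
    pvRow (some b) (s, l) =
      if rowminD l < b.1 then some (rowminD l, s, (idxD l : Int)) else some b := by
  unfold pvRow
  rw [inner_some s l 0 b, if_neg hl]
  simp

theorem pvRow_none (s : Int) (l : List Int) (hl : l ≠ []) :
    pvRow none (s, l) = some (rowminD l, s, (idxD l : Int)) := by
  cases l with
  | nil => exact absurd rfl hl
  | cons x t =>
    unfold pvRow
    show (PySem.List.enumerate (x :: t) 0).foldl (pvStep s) none = _
    rw [PySem.List.enumerate_cons, List.foldl_cons]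
    have hstep : pvStep s none (0, x) = some (x, s, 0) := rfl
    rw [hstep, inner_some s t (0 + 1) (x, s, 0)]
    cases ht : t with
    | nil =>
      have h1 : rowminD [x] = x := rfl
      have h2 : idxD [x] = 0 := idxD_cons_self x [] h1
      simp [h1, h2]
    | cons y t' =>
      rw [← ht]
      have htne : t ≠ [] := by simp [ht]
      rw [if_neg htne]
      by_cases h2 : rowminD t < x
      · obtain ⟨hr, hi⟩ := idxD_cons_gt x t htne h2
        rw [if_pos h2, hr, hi]
        push_cast; ring_nf
      · have hr : rowminD (x :: t) = x := by rw [rowminD_cons x t htne]; omega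
        rw [if_neg h2, hr, idxD_cons_self x t hr]
        simp

theorem tempos_cons (l : List Int) (r : List (List Int)) :
    temposD (l :: r) = rowminD l :: temposD r := rfl

theorem triple_cons_le (l : List Int) (r : List (List Int))
    (h : r = [] ∨ ¬ (menorD r < rowminD l)) :
    menorD (l :: r) = rowminD l ∧ melhorD (l :: r) = 0 ∧ voltaD (l :: r) = idxD l := by
  have hm : menorD (l :: r) = rowminD l := by
    cases r with
    | nil => rfl
    | cons a r' =>
      rcases h with h | h
      · simp at h
      · unfold menorD
        rw [tempos_cons, rowminD_cons _ _ (by simp [temposD])]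
        unfold menorD at h; omega
  have hb : melhorD (l :: r) = 0 := idxD_cons_self _ _ hm
  refine ⟨hm, hb, ?_⟩
  unfold voltaD
  rw [hb, hm]
  rfl

theorem triple_cons_lt (l : List Int) (r : List (List Int)) (hne : r ≠ [])
    (h : menorD r < rowminD l) :
    menorD (l :: r) = menorD r ∧ melhorD (l :: r) = melhorD r + 1 ∧ voltaD (l :: r) = voltaD r := by
  have htne : temposD r ≠ [] := by cases r with | nil => exact absurd rfl hne | cons a r' => simp [temposD]
  obtain ⟨hr, hi⟩ := idxD_cons_gt (rowminD l) (temposD r) htne h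
  have hm : menorD (l :: r) = menorD r := hr
  have hb : melhorD (l :: r) = melhorD r + 1 := hi
  refine ⟨hm, hb, ?_⟩
  unfold voltaD
  rw [hb, hm]
  simp

theorem outer_some : ∀ (r : List (List Int)) (s : Int) (b : Int × Int × Int),
    (∀ l ∈ r, l ≠ []) →
    (PySem.List.enumerate r s).foldl pvRow (some b) =
      if r = [] then some b
      else if menorD r < b.1 then some (menorD r, s + (melhorD r : Int), (voltaD r : Int))
      else some b := by
  intro r
  induction r with
  | nil => simp [PySem.List.enumerate_nil]
  | cons l r' ih =>
    intro s b hrows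
    have hl : l ≠ [] := hrows l (by simp)
    have hrows' : ∀ x ∈ r', x ≠ [] := fun x hx => hrows x (by simp [hx])
    rw [PySem.List.enumerate_cons, List.foldl_cons, pvRow_some s l hl b, if_neg (by simp : ¬ (l :: r' = []))]
    by_cases hx : rowminD l < b.1
    · rw [if_pos hx, ih (s + 1) _ hrows']
      cases hr' : r' with
      | nil =>
        obtain ⟨hm, hb, hv⟩ := triple_cons_le l [] (Or.inl rfl)
        subst hr'
        simp [hm, hb, hv, hx]
      | cons a rr =>
        rw [← hr']
        have hne : r' ≠ [] := by simp [hr']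
        rw [if_neg hne]
        by_cases h2 : menorD r' < rowminD l
        · obtain ⟨hm, hb, hv⟩ := triple_cons_lt l r' hne h2
          rw [if_pos h2, hm, hb, hv, if_pos (by omega)]
          push_cast; ring_nf
        · obtain ⟨hm, hb, hv⟩ := triple_cons_le l r' (Or.inr h2)
          rw [if_neg h2, hm, hb, hv, if_pos hx]
          simp
    · rw [if_neg hx, ih (s + 1) _ hrows']
      cases hr' : r' with
      | nil =>
        obtain ⟨hm, _, _⟩ := triple_cons_le l [] (Or.inl rfl)
        subst hr'
        simp [hm, hx]
      | cons a rr =>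
        rw [← hr']
        have hne : r' ≠ [] := by simp [hr']
        rw [if_neg hne]
        by_cases h2 : menorD r' < b.1
        · have h3 : menorD r' < rowminD l := by omega
          obtain ⟨hm, hb, hv⟩ := triple_cons_lt l r' hne h3
          rw [if_pos h2, hm, hb, hv, if_pos h2]
          push_cast; ring_nf
        · rw [if_neg h2]
          by_cases h3 : menorD r' < rowminD l
          · obtain ⟨hm, _, _⟩ := triple_cons_lt l r' hne h3
            rw [hm, if_neg h2]
          · obtain ⟨hm, _, _⟩ := triple_cons_le l r' (Or.inr h3)
            rw [hm, if_neg hx]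

theorem fold_none (m : List (List Int)) (hne : m ≠ []) (hrows : ∀ l ∈ m, l ≠ []) :
    (PySem.List.enumerate m 0).foldl pvRow none =
      some (menorD m, (melhorD m : Int), (voltaD m : Int)) := by
  cases m with
  | nil => exact absurd rfl hne
  | cons l r =>
    have hl : l ≠ [] := hrows l (by simp)
    have hrows' : ∀ x ∈ r, x ≠ [] := fun x hx => hrows x (by simp [hx])
    rw [PySem.List.enumerate_cons, List.foldl_cons, pvRow_none 0 l hl,
        outer_some r (0 + 1) _ hrows']
    cases hr : r with
    | nil =>
      obtain ⟨hm, hb, hv⟩ := triple_cons_le l [] (Or.inl rfl)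
      subst hr
      simp [hm, hb, hv]
    | cons a rr =>
      rw [← hr]
      have hne' : r ≠ [] := by simp [hr]
      rw [if_neg hne']
      by_cases h2 : menorD r < rowminD l
      · obtain ⟨hm, hb, hv⟩ := triple_cons_lt l r hne' h2
        rw [if_pos h2, hm, hb, hv]
        push_cast; ring_nf
      · obtain ⟨hm, hb, hv⟩ := triple_cons_le l r (Or.inr h2)
        rw [if_neg h2, hm, hb, hv]
        simp


-- ===== VERDICT (by name: the statement is the Claim_ definition above) =====
theorem melhor_volta_spec : Claim_equal_melhor_volta := by
  intro m _ hp
  obtain ⟨hne, hrows⟩ := hp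
  unfold Spec_melhor_volta melhor_volta melhor_volta_alt
  rw [fold_none m hne hrows]
  have htempos : m.foldl (fun acc l => acc ++ [(PySem.List.min? l (fun x => x)).getD 0]) [] = temposD m := by
    simpa [temposD, rowminD] using PySem.List.foldl_append_singleton_eq_map (f := fun l => (PySem.List.min? l (fun x => x)).getD 0) (l := m) (acc := [])
  simp only [htempos, PySem.List.pyGet?_natCast]
  rfl
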